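-- pv_equiv track=rewrite | github.com/brendachavarria/IA | Prog. Logica y Funcional/exa3-p2.py | p332
-- ===== SOURCE A (Python) =====
-- def p332(N):
-- 	i=1
-- 	r=1
-- 	while N > 0:
-- 		if r < 3:
-- 			if i == 1:
-- 				i = 2
-- 				N -= 1
-- 				yield "1"
-- 			else:
-- 				if i == 2:
-- 					i = 3
-- 					N -= 1
-- 					yield "2"
-- 				else:
-- 					if i == 3:
-- 						i = 1
-- 						N -=1
-- 						yield "3"
-- 						r += 1
-- 		else:
-- 			if r == 3:
-- 				if i == 1:
-- 					i = 2
-- 					N -= 1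
-- 					yield "1"
-- 				else:
-- 					if i == 2:
-- 						i = 1
-- 						N -= 1
-- 						yield "2"
-- 						r=1
-- ===== SOURCE B (Python) =====
-- def p332(N):
--     pattern = ("1", "2", "3", "1", "2", "3", "1", "2")
--     for k in range(N):
--         yield pattern[k % 8]
-- ===== Notes on version B (the rewrite author's own statement) =====
-- stated objective: simpler
-- what changed: Replaces the nested i/r state-machine branches with a precomputed fixed-period lookup table indexed modulo the pattern length over range(N).
import Mathlib
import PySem

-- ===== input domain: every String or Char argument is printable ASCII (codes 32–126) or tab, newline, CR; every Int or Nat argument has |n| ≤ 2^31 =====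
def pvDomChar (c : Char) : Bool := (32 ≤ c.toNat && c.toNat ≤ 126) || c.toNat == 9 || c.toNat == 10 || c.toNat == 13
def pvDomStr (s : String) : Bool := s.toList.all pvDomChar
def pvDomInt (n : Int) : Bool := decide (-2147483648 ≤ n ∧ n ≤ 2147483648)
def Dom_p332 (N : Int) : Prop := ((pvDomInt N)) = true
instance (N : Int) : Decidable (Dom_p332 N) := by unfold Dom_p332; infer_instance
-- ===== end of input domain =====

-- B replaces A's nested i/r state-machine branches with a fixed-period lookup table (simpler).

-- ===== PORT A =====
-- while N > 0 loop over state (i, r); each iteration yields once and decrements N,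
-- so the loop runs exactly N.toNat times: fuel = N.toNat is exact.
def p332Loop : Nat → Int → Int → List String
  | 0, _, _ => []
  | fuel + 1, i, r =>
    if r < 3 then
      if i = 1 then "1" :: p332Loop fuel 2 r
      else if i = 2 then "2" :: p332Loop fuel 3 r
      else if i = 3 then "3" :: p332Loop fuel 1 (r + 1)
      else []  -- unreachable from (1,1): i ∈ {1,2,3} always
    else if r = 3 then
      if i = 1 then "1" :: p332Loop fuel 2 r
      else if i = 2 then "2" :: p332Loop fuel 1 1
      else []  -- unreachable
    else []  -- unreachable

def p332 (N : Int) : List String := p332Loop N.toNat 1 1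

-- ===== PORT B =====
def p332Pattern : List String := ["1", "2", "3", "1", "2", "3", "1", "2"]

def p332_alt (N : Int) : List String :=
  (PySem.List.pyRange 0 N 1).map (fun k => PySem.List.pyGetD p332Pattern (PySem.Int.mod k 8) "")

-- ===== PRECONDITION & SPEC =====
def Spec_p332 (N : Int) (out : List String) : Prop := out = p332_alt N
instance (N : Int) (out : List String) : Decidable (Spec_p332 N out) := by unfold Spec_p332; infer_instance

-- ===== CLAIM (what is proved, stated in full; the proofs are below) =====
def Claim_equal_p332 : Prop := ∀ (N : Int), Dom_p332 N → Spec_p332 N (p332 N)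

-- ===== LEMMAS AND PROOFS =====

-- the token emitted at (0-based) position j
def pvPat (j : Nat) : String := p332Pattern.getD (j % 8) ""
-- A's state (i, r) just before emitting token number m
def pvSI (m : Nat) : Int := ([1, 2, 3, 1, 2, 3, 1, 2] : List Int).getD (m % 8) 0
def pvSR (m : Nat) : Int := ([1, 1, 1, 2, 2, 2, 3, 3] : List Int).getD (m % 8) 0

theorem p332Loop_eq (n : Nat) : ∀ m : Nat,
    p332Loop n (pvSI m) (pvSR m) = (List.range n).map (fun j => pvPat (m + j)) := by
  induction n with
  | zero => intro m; simp [p332Loop]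
  | succ n ih =>
    intro m
    have h8 : m % 8 = 0 ∨ m % 8 = 1 ∨ m % 8 = 2 ∨ m % 8 = 3 ∨ m % 8 = 4 ∨
        m % 8 = 5 ∨ m % 8 = 6 ∨ m % 8 = 7 := by omega
    have hr : List.range (n + 1) = 0 :: (List.range n).map Nat.succ :=
      List.range_succ_eq_map
    rcases h8 with h | h | h | h | h | h | h | h <;>
    · have h1 : (m + 1) % 8 = (m % 8 + 1) % 8 := by omega
      have ihm := ih (m + 1)
      simp only [pvSI, pvSR] at ihm
      rw [h1, h] at ihm
      norm_num [List.getD] at ihm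
      simp only [pvSI, pvSR, h]
      norm_num [p332Loop, List.getD]
      rw [ihm, hr]
      simp only [List.map_cons, List.map_map]
      congr 1
      · simp [pvPat, p332Pattern, h]
      · refine List.map_congr_left ?_
        intro j _
        simp only [Function.comp]
        congr 1
        omega

theorem p332_spec : Claim_equal_p332 := by
  intro N _
  show p332Loop N.toNat 1 1 = p332_alt N
  have hA := p332Loop_eq N.toNat 0
  norm_num [pvSI, pvSR, List.getD] at hA
  rw [hA]
  simp only [p332_alt, PySem.List.pyRange_one, List.map_map, Int.sub_zero]
  refine List.map_congr_left ?_
  intro j _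
  simp only [Function.comp, zero_add, pvPat]
  have hm : PySem.Int.mod ((j : Int)) 8 = ((j % 8 : Nat) : Int) := by
    exact_mod_cast PySem.Int.mod_natCast j 8
  rw [hm, PySem.List.pyGetD_natCast]
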